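-- pv_equiv track=rewrite | github.com/alexandraback/datacollection | solutions_5690574640250880_1/Python/Kbo/minesweeper.py | display_grid_mines_in_corners
-- ===== SOURCE A (Python) =====
-- def display_grid_mines_in_corners(m, h, w):
--
--     count = m
--     res = ""
--     for i in range(0, h):
--         for j in range(0, w):
--             if count > 0 and ((i == 0 and (j==0 or j == w - 1)) or (i == h - 1 and (j == 0 or j == w - 1))):
--                 res += "*"
--                 count = count - 1
--             else:
--                 res += "."
--         res += "\n"
--     return res[:2] + "c" + res[3:len(res)-1]
-- ===== SOURCE B (Python) =====
-- def display_grid_mines_in_corners(m, h, w):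
--     # Fill an all-dot grid, then overwrite the first max(m,0) distinct corner
--     # cells (in the original's visitation order) with '*'; same final splice.
--     rows = ["." * w for _ in range(h)]
--     corners = []
--     if h > 0 and w > 0:
--         corners.append((0, 0))
--         if w > 1:
--             corners.append((0, w - 1))
--         if h > 1:
--             corners.append((h - 1, 0))
--             if w > 1:
--                 corners.append((h - 1, w - 1))
--     k = m if m > 0 else 0
--     for i, j in corners[:k]:
--         rows[i] = rows[i][:j] + "*" + rows[i][j + 1:]
--     s = "".join(r + "\n" for r in rows)
--     return s[:2] + "c" + s[3:len(s) - 1]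
-- ===== Notes on version B (the rewrite author's own statement) =====
-- stated objective: alternative
-- what changed: B builds the whole grid as dot-rows first and then overwrites only the (at most four) distinct corner cells, in A's visitation order, with the first max(m,0) stars, instead of A's per-cell corner/count test and per-character string concatenation inside a nested loop over every cell; the final splice is the same.
import Mathlib
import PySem

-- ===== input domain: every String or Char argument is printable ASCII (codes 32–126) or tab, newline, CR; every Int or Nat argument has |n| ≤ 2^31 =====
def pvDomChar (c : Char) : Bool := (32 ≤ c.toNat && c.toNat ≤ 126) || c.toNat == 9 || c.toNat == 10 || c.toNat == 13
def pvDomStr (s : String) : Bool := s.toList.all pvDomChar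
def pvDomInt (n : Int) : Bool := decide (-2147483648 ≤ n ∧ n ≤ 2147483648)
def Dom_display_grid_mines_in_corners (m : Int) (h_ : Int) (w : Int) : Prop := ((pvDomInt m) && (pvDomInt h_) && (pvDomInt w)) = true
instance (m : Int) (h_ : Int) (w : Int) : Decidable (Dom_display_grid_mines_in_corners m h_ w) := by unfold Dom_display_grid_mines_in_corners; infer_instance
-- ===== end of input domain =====

-- B fills an all-dot grid row-by-row and overwrites only the (at most four) corner cells,
-- instead of A's per-cell corner/count test with per-character concatenation; same return value
-- (a timing run measured B faster by a constant factor).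

-- ===== PORT A =====
-- inner loop body of A: one cell of row i
def pvInnerA (h_ w i : Int) (st : List Char × Int) (j : Int) : List Char × Int :=
  if st.2 > 0 ∧ ((i = 0 ∧ (j = 0 ∨ j = w - 1)) ∨ (i = h_ - 1 ∧ (j = 0 ∨ j = w - 1))) then
    (st.1 ++ ['*'], st.2 - 1)
  else
    (st.1 ++ ['.'], st.2)

-- outer loop body of A: one row, then the '\n'
def pvRowA (h_ w : Int) (st : List Char × Int) (i : Int) : List Char × Int :=
  let st2 := (PySem.List.pyRange 0 w 1).foldl (pvInnerA h_ w i) st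
  (st2.1 ++ ['\n'], st2.2)

def display_grid_mines_in_corners (m : Int) (h_ : Int) (w : Int) : String :=
  let res := ((PySem.List.pyRange 0 h_ 1).foldl (pvRowA h_ w) (([] : List Char), m)).1
  -- res[:2] + "c" + res[3:len(res)-1]
  String.mk (PySem.List.slice res none (some 2) ++ ['c'] ++
    PySem.List.slice res (some 3) (some ((res.length : Int) - 1)))

-- ===== PORT B =====
-- the distinct corner cells, in A's visitation order (empty if the grid is empty)
def pvCornersB (h_ w : Int) : List (Nat × Nat) :=
  if h_ > 0 ∧ w > 0 then
    [((0 : Nat), (0 : Nat))]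
      ++ (if w > 1 then [((0 : Nat), (w - 1).toNat)] else [])
      ++ (if h_ > 1 then
            [((h_ - 1).toNat, (0 : Nat))]
              ++ (if w > 1 then [((h_ - 1).toNat, (w - 1).toNat)] else [])
          else [])
  else []

-- rows[i] = rows[i][:j] + "*" + rows[i][j+1:]
def pvPatchB (g : List (List Char)) (ij : Nat × Nat) : List (List Char) :=
  g.modify ij.1 (fun r => r.take ij.2 ++ ['*'] ++ r.drop (ij.2 + 1))

def display_grid_mines_in_corners_alt (m : Int) (h_ : Int) (w : Int) : String :=
  let base := (PySem.List.pyRange 0 h_ 1).map (fun _ => List.replicate w.toNat '.')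
  let k := if m > 0 then m.toNat else 0
  let rows := ((pvCornersB h_ w).take k).foldl pvPatchB base
  let s := rows.foldl (fun acc r => acc ++ r ++ ['\n']) ([] : List Char)
  String.mk (PySem.List.slice s none (some 2) ++ ['c'] ++
    PySem.List.slice s (some 3) (some ((s.length : Int) - 1)))

-- ===== PRECONDITION & SPEC =====
def Spec_display_grid_mines_in_corners (m : Int) (h_ : Int) (w : Int) (out : String) : Prop := out = display_grid_mines_in_corners_alt m h_ w
instance (m : Int) (h_ : Int) (w : Int) (out : String) : Decidable (Spec_display_grid_mines_in_corners m h_ w out) := by unfold Spec_display_grid_mines_in_corners; infer_instance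

-- ===== CLAIM (what is proved, stated in full; the proofs are below) =====
def Claim_equal_display_grid_mines_in_corners : Prop := ∀ (m : Int) (h_ : Int) (w : Int), Dom_display_grid_mines_in_corners m h_ w → Spec_display_grid_mines_in_corners m h_ w (display_grid_mines_in_corners m h_ w)

-- ===== LEMMAS AND PROOFS =====

-- the character A writes at a corner visited with count c, and the count afterwards
def pvCh (c : Int) : Char := if c > 0 then '*' else '.'
def pvDec (c : Int) : Int := if c > 0 then c - 1 else c

-- a corner row as A produces it, starting from count c (w ≥ 1)
def pvRowTop (c w : Int) : List Char :=
  if w = 1 then [pvCh c] else [pvCh c] ++ List.replicate (w - 2).toNat '.' ++ [pvCh (pvDec c)]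

-- the count after a corner row
def pvCnt2 (c w : Int) : Int := if w = 1 then pvDec c else pvDec (pvDec c)

-- common normal form of the pre-splice grid string
def pvGrid (m h_ w : Int) : List Char :=
  if h_ ≤ 0 then []
  else if w ≤ 0 then (List.replicate h_.toNat ['\n']).flatten
  else if h_ = 1 then pvRowTop m w ++ ['\n']
  else pvRowTop m w ++ ['\n']
    ++ (List.replicate (h_ - 2).toNat (List.replicate w.toNat '.' ++ ['\n'])).flatten
    ++ pvRowTop (pvCnt2 m w) w ++ ['\n']

theorem dots_split (w : Int) (hw : 2 ≤ w) :
    List.replicate w.toNat '.' = ['.'] ++ List.replicate (w - 2).toNat '.' ++ ['.'] := by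
  have h1 : w.toNat = 1 + ((w - 2).toNat + 1) := by omega
  rw [h1, List.replicate_add]
  simp [List.replicate_succ']

theorem repl_split {α : Type} (n : Int) (x : α) (hn : 2 ≤ n) :
    List.replicate n.toNat x = x :: (List.replicate (n - 2).toNat x ++ [x]) := by
  have h1 : n.toNat = 1 + ((n - 2).toNat + 1) := by omega
  rw [h1, List.replicate_add]
  simp [List.replicate_succ']

theorem modify_last {α : Type} (y : α) (t : List α) (f : α → α) :
    (t ++ [y]).modify t.length f = t ++ [f y] := by
  induction t with
  | nil => simp
  | cons a t ih =>
    simp only [List.cons_append, List.length_cons, List.modify_succ_cons, ih]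

theorem join_eq (rs : List (List Char)) (acc : List Char) :
    rs.foldl (fun acc r => acc ++ r ++ ['\n']) acc = acc ++ (rs.map (· ++ ['\n'])).flatten := by
  induction rs generalizing acc with
  | nil => simp
  | cons r rs ih => simp [ih, List.append_assoc]

-- A's inner loop over cells none of which is a corner appends only dots
theorem innerA_dots (h_ w i : Int) (l : List Int) (st : List Char × Int)
    (hg : ∀ j ∈ l, ¬((i = 0 ∧ (j = 0 ∨ j = w - 1)) ∨ (i = h_ - 1 ∧ (j = 0 ∨ j = w - 1)))) :
    l.foldl (pvInnerA h_ w i) st = (st.1 ++ List.replicate l.length '.', st.2) := by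
  induction l generalizing st with
  | nil => simp
  | cons j l ih =>
    have hj := hg j (by simp)
    have hstep : pvInnerA h_ w i st j = (st.1 ++ ['.'], st.2) := by
      unfold pvInnerA
      rw [if_neg (by tauto)]
    simp only [List.foldl_cons, hstep]
    rw [ih _ (fun j hj => hg j (by simp [hj]))]
    simp [List.replicate_succ, List.append_assoc]

-- A's inner loop over a corner row (i = 0 or i = h-1)
theorem rowA_corner (h_ w i : Int) (hw : 1 ≤ w) (hi : i = 0 ∨ i = h_ - 1) (st : List Char × Int) :
    (PySem.List.pyRange 0 w 1).foldl (pvInnerA h_ w i) st = (st.1 ++ pvRowTop st.2 w, pvCnt2 st.2 w) := by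
  by_cases hw1 : w = 1
  · subst hw1
    have e2 : PySem.List.pyRange 0 1 1 = [0] := by
      simpa using PySem.List.pyRange_one_singleton (0 : Int)
    rw [e2]
    simp only [List.foldl_cons, List.foldl_nil, pvInnerA, pvRowTop, pvCnt2, pvCh, pvDec]
    rcases hi with rfl | rfl <;> split_ifs <;> simp_all <;> omega
  · have hw2 : 2 ≤ w := by omega
    have e1 : PySem.List.pyRange 0 w 1
        = PySem.List.pyRange 0 1 1 ++ (PySem.List.pyRange 1 (w - 1) 1 ++ PySem.List.pyRange (w - 1) w 1) := by
      rw [← PySem.List.pyRange_one_append 1 (w - 1) w (by omega) (by omega),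
          ← PySem.List.pyRange_one_append 0 1 w (by omega) (by omega)]
    have e2 : PySem.List.pyRange 0 1 1 = [0] := by
      simpa using PySem.List.pyRange_one_singleton (0 : Int)
    have e3 : PySem.List.pyRange (w - 1) w 1 = [w - 1] := by
      have h := PySem.List.pyRange_one_singleton (w - 1)
      rw [sub_add_cancel] at h
      exact h
    rw [e1, e2, e3, List.foldl_append, List.foldl_append]
    have s1 : List.foldl (pvInnerA h_ w i) st [0] = (st.1 ++ [pvCh st.2], pvDec st.2) := by
      simp only [List.foldl_cons, List.foldl_nil, pvInnerA, pvCh, pvDec]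
      rcases hi with rfl | rfl <;> split_ifs <;> simp_all <;> omega
    rw [s1]
    have s2 := innerA_dots h_ w i (PySem.List.pyRange 1 (w - 1) 1) (st.1 ++ [pvCh st.2], pvDec st.2)
      (by
        intro j hj
        rw [PySem.List.mem_pyRange_one] at hj
        rcases hi with rfl | rfl <;> simp <;> omega)
    rw [s2]
    have hlen : (PySem.List.pyRange 1 (w - 1) 1).length = (w - 2).toNat := by
      rw [PySem.List.length_pyRange_one]; congr 1; omega
    rw [hlen]
    simp only [List.foldl_cons, List.foldl_nil, pvInnerA, pvRowTop, pvCnt2, pvCh, pvDec]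
    rcases hi with rfl | rfl <;> split_ifs <;> simp_all [List.append_assoc] <;> omega

-- A's outer loop over rows that contain no corner appends only dot-rows
theorem rowsA_mid (h_ w : Int) (l : List Int) (st : List Char × Int)
    (hg : ∀ i ∈ l, i ≠ 0 ∧ i ≠ h_ - 1) :
    l.foldl (pvRowA h_ w) st
      = (st.1 ++ (List.replicate l.length (List.replicate w.toNat '.' ++ ['\n'])).flatten, st.2) := by
  induction l generalizing st with
  | nil => simp
  | cons i l ih =>
    have hi := hg i (by simp)
    have hstep : pvRowA h_ w st i = (st.1 ++ List.replicate w.toNat '.' ++ ['\n'], st.2) := by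
      unfold pvRowA
      rw [innerA_dots h_ w i _ st (by intro j hj; simp; omega)]
      rw [PySem.List.length_pyRange_one]
      simp
    simp only [List.foldl_cons, hstep]
    rw [ih _ (fun i hi => hg i (by simp [hi]))]
    simp [List.replicate_succ, List.append_assoc]

-- A's outer loop when rows are empty (w ≤ 0)
theorem rowsA_noW (h_ w : Int) (hw : w ≤ 0) (l : List Int) (st : List Char × Int) :
    l.foldl (pvRowA h_ w) st = (st.1 ++ (List.replicate l.length ['\n']).flatten, st.2) := by
  induction l generalizing st with
  | nil => simp
  | cons i l ih =>
    have hstep : pvRowA h_ w st i = (st.1 ++ ['\n'], st.2) := by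
      unfold pvRowA
      rw [PySem.List.pyRange_one_eq_nil (by omega)]
      simp
    simp only [List.foldl_cons, hstep]
    rw [ih]
    simp [List.replicate_succ, List.append_assoc]

-- A's pre-splice string equals the normal form
theorem A_core (m h_ w : Int) :
    ((PySem.List.pyRange 0 h_ 1).foldl (pvRowA h_ w) (([] : List Char), m)).1 = pvGrid m h_ w := by
  unfold pvGrid
  by_cases hh0 : h_ ≤ 0
  · rw [PySem.List.pyRange_one_eq_nil (by omega), if_pos hh0]
    simp
  · rw [if_neg hh0]
    by_cases hw0 : w ≤ 0
    · rw [if_pos hw0, rowsA_noW h_ w hw0]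
      rw [PySem.List.length_pyRange_one]
      simp
    · rw [if_neg hw0]
      have hw1 : 1 ≤ w := by omega
      by_cases hh1 : h_ = 1
      · subst hh1
        rw [if_pos rfl]
        have e2 : PySem.List.pyRange 0 1 1 = [0] := by
          simpa using PySem.List.pyRange_one_singleton (0 : Int)
        rw [e2]
        simp only [List.foldl_cons, List.foldl_nil, pvRowA]
        rw [rowA_corner 1 w 0 hw1 (Or.inl rfl)]
        simp
      · rw [if_neg hh1]
        have hh2 : 2 ≤ h_ := by omega
        have e1 : PySem.List.pyRange 0 h_ 1
            = PySem.List.pyRange 0 1 1 ++ (PySem.List.pyRange 1 (h_ - 1) 1 ++ PySem.List.pyRange (h_ - 1) h_ 1) := by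
          rw [← PySem.List.pyRange_one_append 1 (h_ - 1) h_ (by omega) (by omega),
              ← PySem.List.pyRange_one_append 0 1 h_ (by omega) (by omega)]
        have e2 : PySem.List.pyRange 0 1 1 = [0] := by
          simpa using PySem.List.pyRange_one_singleton (0 : Int)
        have e3 : PySem.List.pyRange (h_ - 1) h_ 1 = [h_ - 1] := by
          have h := PySem.List.pyRange_one_singleton (h_ - 1)
          rw [sub_add_cancel] at h
          exact h
        rw [e1, e2, e3, List.foldl_append, List.foldl_append]
        have s1 : List.foldl (pvRowA h_ w) (([] : List Char), m) [0]
            = (pvRowTop m w ++ ['\n'], pvCnt2 m w) := by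
          simp only [List.foldl_cons, List.foldl_nil, pvRowA]
          rw [rowA_corner h_ w 0 hw1 (Or.inl rfl)]
          simp
        rw [s1]
        have s2 := rowsA_mid h_ w (PySem.List.pyRange 1 (h_ - 1) 1) (pvRowTop m w ++ ['\n'], pvCnt2 m w)
          (by
            intro i hi
            rw [PySem.List.mem_pyRange_one] at hi
            omega)
        rw [s2]
        have hlen : (PySem.List.pyRange 1 (h_ - 1) 1).length = (h_ - 2).toNat := by
          rw [PySem.List.length_pyRange_one]; congr 1; omega
        rw [hlen]
        simp only [List.foldl_cons, List.foldl_nil, pvRowA]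
        rw [rowA_corner h_ w (h_ - 1) hw1 (Or.inr rfl)]

-- modifying the final row of (a replicate block ++ [last row])
theorem modify_replicate_append {α : Type} (n : Nat) (x y : α) (f : α → α) :
    (List.replicate n x ++ [y]).modify n f = List.replicate n x ++ [f y] := by
  have h := modify_last y (List.replicate n x) f
  simpa using h

-- B's pre-splice string equals the normal form
theorem B_core (m h_ w : Int) :
    (((pvCornersB h_ w).take (if m > 0 then m.toNat else 0)).foldl pvPatchB
        ((PySem.List.pyRange 0 h_ 1).map (fun _ => List.replicate w.toNat '.'))).foldl
      (fun acc r => acc ++ r ++ ['\n']) ([] : List Char) = pvGrid m h_ w := by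
  rw [show (PySem.List.pyRange 0 h_ 1).map (fun _ => List.replicate w.toNat '.')
      = List.replicate h_.toNat (List.replicate w.toNat '.') from by
    rw [List.map_const', PySem.List.length_pyRange_one]
    simp]
  by_cases hh0 : h_ ≤ 0
  · have hb : h_.toNat = 0 := by omega
    simp [pvCornersB, pvGrid, hb, hh0, (show ¬(h_ > 0 ∧ w > 0) by omega)]
  by_cases hw0 : w ≤ 0
  · have hb : w.toNat = 0 := by omega
    simp [pvCornersB, pvGrid, hb, hh0, hw0, (show ¬(h_ > 0 ∧ w > 0) by omega)]
  have hcor : pvCornersB h_ w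
      = [((0 : Nat), (0 : Nat))]
        ++ (if w > 1 then [((0 : Nat), (w - 1).toNat)] else [])
        ++ (if h_ > 1 then
              [((h_ - 1).toNat, (0 : Nat))]
                ++ (if w > 1 then [((h_ - 1).toNat, (w - 1).toNat)] else [])
            else []) := by
    unfold pvCornersB
    rw [if_pos ⟨by omega, by omega⟩]
  unfold pvGrid
  rw [if_neg hh0, if_neg hw0]
  by_cases hw1 : w = 1
  · subst hw1
    rw [hcor]
    by_cases hh1 : h_ = 1
    · subst hh1
      rw [if_pos rfl]
      simp only [show ¬((1:Int) > 1) by omega, if_false, List.append_nil, List.replicate_one]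
      by_cases hm : m > 0
      · rw [if_pos hm, List.take_of_length_le (by simp; omega)]
        simp [pvPatchB, pvRowTop, pvCh, pvCnt2, pvDec, hm]
      · rw [if_neg hm]
        simp [pvRowTop, pvCh, pvCnt2, pvDec, hm]
    · rw [if_neg hh1]
      have hh2 : 2 ≤ h_ := by omega
      simp only [show ¬((1:Int) > 1) by omega, if_false, List.append_nil,
        if_pos (show h_ > 1 by omega), List.cons_append, List.nil_append, List.singleton_append,
        List.replicate_one]
      rw [repl_split h_ _ hh2]
      by_cases hm0 : m > 0
      · by_cases hm1 : m = 1
        · subst hm1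
          rw [if_pos (by omega)]
          simp [pvPatchB, join_eq, pvRowTop, pvCh, pvCnt2, pvDec]
        · have hm2 : 2 ≤ m := by omega
          rw [if_pos hm0, List.take_of_length_le (by simp; omega)]
          simp [pvPatchB, join_eq, pvRowTop, pvCh, pvCnt2, pvDec,
            List.modify_succ_cons, modify_replicate_append,
            show (h_ - 1).toNat = (h_ - 2).toNat + 1 by omega,
            show (0:Int) < m by omega, show (1:Int) < m by omega]
      · rw [if_neg hm0]
        simp [join_eq, pvRowTop, pvCh, pvCnt2, pvDec, hm0]
  · have hw2 : 2 ≤ w := by omega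
    have hwa : w.toNat - 1 = (w - 2).toNat + 1 := by omega
    have hwb : (w - 1).toNat = (w - 2).toNat + 1 := by omega
    rw [hcor]
    simp only [if_pos (show w > 1 by omega)]
    by_cases hh1 : h_ = 1
    · subst hh1
      rw [if_pos rfl]
      simp only [show ¬((1:Int) > 1) by omega, if_false, List.append_nil,
        show (1:Int).toNat = 1 from rfl, List.replicate_one,
        List.cons_append, List.nil_append, List.singleton_append]
      by_cases hm0 : m > 0
      · by_cases hm1 : m = 1
        · subst hm1
          rw [if_pos (by omega)]
          simp [pvPatchB, pvRowTop, pvCh, pvCnt2, pvDec,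
            List.take_replicate, List.drop_replicate, List.replicate_succ', hwa, hwb, hw1, List.drop_eq_nil_of_le]
        · have hm2 : 2 ≤ m := by omega
          rw [if_pos hm0, List.take_of_length_le (by simp; omega)]
          simp [pvPatchB, pvRowTop, pvCh, pvCnt2, pvDec,
            List.take_replicate, List.drop_replicate, List.replicate_succ', hwa, hwb, hw1, List.drop_eq_nil_of_le,
            show (0:Int) < m by omega, show (1:Int) < m by omega]
      · rw [if_neg hm0]
        rw [dots_split w hw2]
        simp [pvRowTop, pvCh, pvCnt2, pvDec, hm0, hw1]
    · rw [if_neg hh1]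
      have hh2 : 2 ≤ h_ := by omega
      simp only [if_pos (show h_ > 1 by omega),
        List.cons_append, List.nil_append, List.singleton_append]
      rw [repl_split h_ _ hh2]
      by_cases hm0 : m > 0
      · by_cases hm1 : m = 1
        · subst hm1
          rw [if_pos (by omega)]
          simp [pvPatchB, join_eq, pvRowTop, pvCh, pvCnt2, pvDec,
            List.take_replicate, List.drop_replicate, List.replicate_succ', hwa, hwb, hw1, List.drop_eq_nil_of_le,
            dots_split w hw2]
        · by_cases hm2 : m = 2
          · subst hm2
            rw [if_pos (by omega)]
            simp [pvPatchB, join_eq, pvRowTop, pvCh, pvCnt2, pvDec,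
              List.take_replicate, List.drop_replicate, List.replicate_succ', hwa, hwb, hw1, List.drop_eq_nil_of_le,
              dots_split w hw2]
          · by_cases hm3 : m = 3
            · subst hm3
              rw [if_pos (by omega)]
              simp [pvPatchB, join_eq, pvRowTop, pvCh, pvCnt2, pvDec,
                List.take_replicate, List.drop_replicate, List.replicate_succ', hwa, hwb, hw1, List.drop_eq_nil_of_le,
                List.modify_succ_cons, modify_replicate_append,
                show (h_ - 1).toNat = (h_ - 2).toNat + 1 by omega,
                dots_split w hw2]
            · have hm4 : 4 ≤ m := by omega
              rw [if_pos hm0, List.take_of_length_le (by simp; omega)]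
              simp [pvPatchB, join_eq, pvRowTop, pvCh, pvCnt2, pvDec,
                List.take_replicate, List.drop_replicate, List.replicate_succ', hwa, hwb, hw1, List.drop_eq_nil_of_le,
                List.modify_succ_cons, modify_replicate_append,
                show (h_ - 1).toNat = (h_ - 2).toNat + 1 by omega,
                show (0:Int) < m by omega, show (1:Int) < m by omega,
                show (2:Int) < m by omega, show (3:Int) < m by omega]
              split_ifs <;> omega
      · rw [if_neg hm0]
        rw [dots_split w hw2]
        simp [join_eq, pvRowTop, pvCh, pvCnt2, pvDec, hm0, hw1]

-- ===== VERDICT (by name: the statement is the Claim_ definition above) =====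
theorem display_grid_mines_in_corners_spec : Claim_equal_display_grid_mines_in_corners := by
  intro m h_ w _
  unfold Spec_display_grid_mines_in_corners display_grid_mines_in_corners display_grid_mines_in_corners_alt
  dsimp only
  rw [A_core, B_core]
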